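-- pv_equiv track=rewrite | github.com/KwesiD/TwitterPoetry | Process.py | iambic_pentameter
-- ===== SOURCE A (Python) =====
-- def check_seq_word(word_info, prev_stress_OG):
-- 	syllables = word_info[2]
-- 	valid = True
-- 	prev_stress = prev_stress_OG
-- 	for syl in syllables:
-- 		cur_stress = syl[1]
-- 		if (cur_stress == prev_stress):
-- 			valid = False
-- 			break
-- 		prev_stress = cur_stress
-- 	last_stress = prev_stress
-- 	return (valid, last_stress)
--
-- def iambic_pentameter(words_info):
-- 	prev_stress_OG = False
-- 	for word_info in words_info:
-- 		sequence = check_seq_word(word_info,prev_stress_OG)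
-- 		valid = sequence[0]
-- 		if not valid:
-- 			return False
-- 		prev_stress_OG = sequence[1]
-- 	return True
-- ===== SOURCE B (Python) =====
-- def iambic_pentameter(words_info):
-- 	bits = [stress for _, _, syllables in words_info for _, stress in syllables]
-- 	return bits == [i % 2 == 0 for i in range(len(bits))]
-- ===== Notes on version B (the rewrite author's own statement) =====
-- stated objective: simpler
-- what changed: Replaces the per-word helper with threaded (valid, last_stress) state by a stateless positional-parity check: flatten the stress bits and compare the whole list against the expected pattern [i % 2 == 0 for i in range(len)], valid iff every bit sits at an even index exactly when it is stressed.
import Mathlib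
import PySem

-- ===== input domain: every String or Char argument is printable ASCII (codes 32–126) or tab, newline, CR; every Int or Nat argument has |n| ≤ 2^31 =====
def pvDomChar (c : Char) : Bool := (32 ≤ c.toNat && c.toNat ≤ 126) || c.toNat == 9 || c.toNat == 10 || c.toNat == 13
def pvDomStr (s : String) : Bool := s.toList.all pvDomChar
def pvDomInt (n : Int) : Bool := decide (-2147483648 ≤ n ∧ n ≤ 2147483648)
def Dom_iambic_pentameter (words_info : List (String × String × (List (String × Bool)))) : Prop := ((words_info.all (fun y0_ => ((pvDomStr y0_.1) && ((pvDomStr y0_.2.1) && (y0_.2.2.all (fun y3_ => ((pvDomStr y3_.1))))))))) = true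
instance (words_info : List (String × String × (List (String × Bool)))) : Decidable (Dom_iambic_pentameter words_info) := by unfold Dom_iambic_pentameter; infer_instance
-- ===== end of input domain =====

-- B replaces the per-word helper and (valid, last_stress) threading by a stateless
-- positional-parity check: the flat stress list must equal [i % 2 == 0 | i < len]
-- (objective: simpler).

-- ===== PORT A =====
-- the for-loop of check_seq_word, with the early 'break' (valid := false, prev unchanged)
def csw_loop (syllables : List (String × Bool)) (prev_stress : Bool) : Bool × Bool :=
  match syllables with
  | [] => (true, prev_stress)
  | syl :: rest =>
    if syl.2 == prev_stress then (false, prev_stress)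
    else csw_loop rest syl.2

def check_seq_word (word_info : String × String × (List (String × Bool))) (prev_stress_OG : Bool) : Bool × Bool :=
  csw_loop word_info.2.2 prev_stress_OG

-- the for-loop of iambic_pentameter over words_info, threading prev_stress_OG
def ip_loop (words : List (String × String × (List (String × Bool)))) (prev_stress_OG : Bool) : Bool :=
  match words with
  | [] => true
  | word_info :: rest =>
    let sequence := check_seq_word word_info prev_stress_OG
    if !sequence.1 then false
    else ip_loop rest sequence.2

def iambic_pentameter (words_info : List (String × String × (List (String × Bool)))) : Bool :=
  ip_loop words_info false

-- ===== PORT B =====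
def iambic_pentameter_alt (words_info : List (String × String × (List (String × Bool)))) : Bool :=
  let bits := words_info.flatMap (fun w => w.2.2.map Prod.snd)
  bits == (List.range bits.length).map (fun i => decide (i % 2 = 0))

-- ===== PRECONDITION & SPEC =====
def Spec_iambic_pentameter (words_info : List (String × String × (List (String × Bool)))) (out : Bool) : Prop := out = iambic_pentameter_alt words_info
instance (words_info : List (String × String × (List (String × Bool)))) (out : Bool) : Decidable (Spec_iambic_pentameter words_info out) := by unfold Spec_iambic_pentameter; infer_instance

-- ===== CLAIM =====
def Claim_equal_iambic_pentameter : Prop := ∀ (words_info : List (String × String × (List (String × Bool)))), Dom_iambic_pentameter words_info → Spec_iambic_pentameter words_info (iambic_pentameter words_info)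

-- ===== LEMMAS AND PROOFS =====

-- abstract 'alternating chain starting after prev'
def chainOK (prev : Bool) : List Bool → Bool
  | [] => true
  | b :: bs => (b != prev) && chainOK b bs

-- A's word loop, continued by the rest of the flat stream, equals chainOK
theorem csw_loop_chain (syls : List (String × Bool)) (prev : Bool) (rest : List Bool) :
    chainOK prev (syls.map Prod.snd ++ rest)
      = (if (csw_loop syls prev).1 then chainOK (csw_loop syls prev).2 rest else false) := by
  induction syls generalizing prev with
  | nil => simp [csw_loop]
  | cons s ss ih =>
    by_cases h : s.2 = prev
    · simp [csw_loop, chainOK, h]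
    · have hb : (s.2 == prev) = false := by simp [h]
      have hn : (s.2 != prev) = true := by simp [h]
      simp [csw_loop, chainOK, hb, hn, ih s.2]

theorem ip_loop_chain (ws : List (String × String × (List (String × Bool)))) (prev : Bool) :
    ip_loop ws prev = chainOK prev (ws.flatMap (fun w => w.2.2.map Prod.snd)) := by
  induction ws generalizing prev with
  | nil => simp [ip_loop, chainOK]
  | cons w ws ih =>
    simp only [ip_loop, check_seq_word, List.flatMap_cons, csw_loop_chain w.2.2 prev]
    by_cases h : (csw_loop w.2.2 prev).1
    · simp [h, ih]
    · simp [h]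

-- the expected pattern starting with bit b
def pat (b : Bool) : Nat → List Bool
  | 0 => []
  | n + 1 => b :: pat (!b) n

theorem chainOK_eq_pat (prev : Bool) (bs : List Bool) :
    chainOK prev bs = (bs == pat (!prev) bs.length) := by
  induction bs generalizing prev with
  | nil => simp [chainOK, pat]
  | cons b bs ih =>
    simp only [chainOK, List.length_cons, pat, List.cons_beq_cons, ih b]
    cases b <;> cases prev <;> simp

theorem pat_eq_range (b : Bool) (n : Nat) :
    pat b n = (List.range n).map (fun i => decide (i % 2 = 0) == b) := by
  induction n generalizing b with
  | zero => simp [pat]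
  | succ n ih =>
    rw [List.range_succ_eq_map]
    simp only [pat, List.map_cons, List.map_map]
    refine List.cons_eq_cons.mpr ⟨by simp, ?_⟩
    rw [ih (!b)]
    apply List.map_congr_left
    intro i _
    have h2 : (i + 1) % 2 = 0 ↔ ¬ (i % 2 = 0) := by omega
    by_cases h : i % 2 = 0 <;> cases b <;> simp [Function.comp, h, h2]

-- ===== VERDICT =====
theorem iambic_pentameter_spec : Claim_equal_iambic_pentameter := by
  intro ws _
  show iambic_pentameter ws = iambic_pentameter_alt ws
  simp only [iambic_pentameter, iambic_pentameter_alt, ip_loop_chain, chainOK_eq_pat,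
    Bool.not_false, pat_eq_range]
  congr 1
  apply List.map_congr_left
  intro i _
  cases h : decide (i % 2 = 0) <;> simp
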